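-- pv_equiv track=rewrite | github.com/Bazinga9000/Bazbot | chesh_mechanics.py | void
-- ===== SOURCE A (Python) =====
-- def void(initpos,board):
--     moves = []
--
--     for i in range(len(board)):
--         for j in range(len(board)):
--             moves.append((i-initpos[0],j-initpos[1]))
--
--     for i in range(len(board)):
--         for j in range(len(board)):
--             if board[i][j] is not None:
--                 for k in [-1,0,1]:
--                     for l in [-1,0,1]:
--                         if (k,l) != (0,0):
--                             moves = [m for m in moves if m != ((i+k-initpos[0]),(j+l-initpos[1]))]
--
--     return [[i] for i in moves]
-- ===== SOURCE B (Python) =====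
-- def void(initpos, board):
--     n = len(board)
--     bad = set()
--     for i in range(n):
--         for j in range(n):
--             if board[i][j] is not None:
--                 for k in (-1, 0, 1):
--                     for l in (-1, 0, 1):
--                         if (k, l) != (0, 0):
--                             bad.add((i + k, j + l))
--     return [[(i - initpos[0], j - initpos[1])]
--             for i in range(n) for j in range(n) if (i, j) not in bad]
-- ===== Notes on version B (the rewrite author's own statement) =====
-- stated objective: faster
-- what changed: Instead of building the full move list and rebuilding it by a filtering pass over all moves for each of the 8 neighbours of every occupied cell (O(n^4)), B precomputes the set of cells adjacent to occupied cells once and emits the surviving relative moves in one row-major pass.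
import Mathlib
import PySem

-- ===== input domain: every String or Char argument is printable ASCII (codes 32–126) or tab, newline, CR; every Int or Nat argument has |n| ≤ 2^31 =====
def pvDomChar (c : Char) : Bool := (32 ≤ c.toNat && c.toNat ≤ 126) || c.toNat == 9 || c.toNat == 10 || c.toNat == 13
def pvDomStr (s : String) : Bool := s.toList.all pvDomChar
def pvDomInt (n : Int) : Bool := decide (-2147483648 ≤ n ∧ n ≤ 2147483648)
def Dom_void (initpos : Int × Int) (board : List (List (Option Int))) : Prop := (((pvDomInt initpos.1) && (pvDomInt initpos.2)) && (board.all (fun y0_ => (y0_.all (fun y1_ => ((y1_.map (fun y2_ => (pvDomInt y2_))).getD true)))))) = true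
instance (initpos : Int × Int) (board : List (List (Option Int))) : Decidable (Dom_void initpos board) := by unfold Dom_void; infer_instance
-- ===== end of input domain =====

-- B replaces A's repeated full-list filtering passes (one per neighbour of every occupied
-- cell) by one precomputed set of cells adjacent to occupied cells and a single row-major
-- pass; equality of return values is proved on Pre_void (rows long enough to index).

-- ===== PORT A =====
-- board[i][j] is ported as (board.getD i []).getD j none: exact whenever j < (board[i]).length,
-- which Pre_void guarantees (Python raises IndexError otherwise, excluded by Pre_void).
def void (initpos : Int × Int) (board : List (List (Option Int))) : List (List (Int × Int)) :=
  let n := board.length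
  let moves0 : List (Int × Int) :=
    (List.range n).foldl (fun mv i =>
      (List.range n).foldl (fun mv j =>
        mv ++ [((i : Int) - initpos.1, (j : Int) - initpos.2)]) mv) []
  let moves :=
    (List.range n).foldl (fun mv i =>
      (List.range n).foldl (fun mv j =>
        if ((board.getD i []).getD j none).isSome then
          ([-1, 0, 1] : List Int).foldl (fun mv k =>
            ([-1, 0, 1] : List Int).foldl (fun mv l =>
              if (k, l) ≠ ((0 : Int), (0 : Int)) then
                mv.filter (fun m => decide (m ≠ ((i : Int) + k - initpos.1, (j : Int) + l - initpos.2)))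
              else mv) mv) mv
        else mv) mv) moves0
  moves.map (fun m => [m])

-- ===== PORT B =====
-- same indexing convention for board[i][j] (exact under Pre_void)
def void_alt (initpos : Int × Int) (board : List (List (Option Int))) : List (List (Int × Int)) :=
  let n := board.length
  let bad : PySem.Set (Int × Int) :=
    (List.range n).foldl (fun bad i =>
      (List.range n).foldl (fun bad j =>
        if ((board.getD i []).getD j none).isSome then
          ([-1, 0, 1] : List Int).foldl (fun bad k =>
            ([-1, 0, 1] : List Int).foldl (fun bad l =>
              if (k, l) ≠ ((0 : Int), (0 : Int)) then
                PySem.Set.add bad ((i : Int) + k, (j : Int) + l)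
              else bad) bad) bad
        else bad) bad) PySem.Set.empty
  (List.range n).flatMap (fun i =>
    (List.range n).flatMap (fun j =>
      if ((i : Int), (j : Int)) ∈ bad then []
      else [[((i : Int) - initpos.1, (j : Int) - initpos.2)]]))

-- ===== PRECONDITION & SPEC =====
-- Pre_void excludes only ragged boards whose rows are shorter than the board's height:
-- there A's board[i][j] raises IndexError (B's indexing raises there too).
def Pre_void (initpos : Int × Int) (board : List (List (Option Int))) : Prop :=
  ∀ row ∈ board, board.length ≤ row.length
instance (initpos : Int × Int) (board : List (List (Option Int))) : Decidable (Pre_void initpos board) := by unfold Pre_void; infer_instance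

def pvWitness_void : (Int × Int) × List (List (Option Int)) := ((1, -1), [[some 3, none], [none, none]])

def Spec_void (initpos : Int × Int) (board : List (List (Option Int))) (out : List (List (Int × Int))) : Prop := out = void_alt initpos board
instance (initpos : Int × Int) (board : List (List (Option Int))) (out : List (List (Int × Int))) : Decidable (Spec_void initpos board out) := by unfold Spec_void; infer_instance

-- ===== CLAIM (what is proved, stated in full; the proofs are below) =====
def Claim_equal_void : Prop := ∀ (initpos : Int × Int) (board : List (List (Option Int))), Dom_void initpos board → Pre_void initpos board → Spec_void initpos board (void initpos board)

-- ===== LEMMAS AND PROOFS =====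

-- a fold that filters at every step is one filter by the conjunction of the step predicates
theorem foldl_filter_eq_filter_all {ι α : Type} (xs : List ι) (q : ι → α → Bool) (mv : List α) :
    xs.foldl (fun mv x => mv.filter (q x)) mv = mv.filter (fun a => xs.all (fun x => q x a)) := by
  induction xs generalizing mv with
  | nil => simp
  | cons x xs ih =>
      simp only [List.foldl_cons, ih, List.filter_filter, List.all_cons]
      congr 1
      funext a
      rw [Bool.and_comm]

-- an 'if c then filter else unchanged' step is itself a filter
theorem ite_filter_eq_filter {α : Type} (c : Prop) [Decidable c] (mv : List α) (q : α → Bool) :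
    (if c then mv.filter q else mv) = mv.filter (fun a => !decide c || q a) := by
  split_ifs with h <;> simp [h]

-- membership in a fold whose steps only add elements
theorem mem_foldl_of_step {ι α : Type} (xs : List ι) (g : List α → ι → List α)
    (C : ι → α → Prop) (h : ∀ s x y, y ∈ g s x ↔ y ∈ s ∨ C x y) (s : List α) (y : α) :
    y ∈ xs.foldl g s ↔ y ∈ s ∨ ∃ x ∈ xs, C x y := by
  induction xs generalizing s with
  | nil => simp
  | cons x xs ih =>
      simp only [List.foldl_cons, ih, h, List.mem_cons]
      constructor
      · rintro ((hy | hy) | ⟨x', hx', hy⟩)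
        · exact Or.inl hy
        · exact Or.inr ⟨x, Or.inl rfl, hy⟩
        · exact Or.inr ⟨x', Or.inr hx', hy⟩
      · rintro (hy | ⟨x', (rfl | hx'), hy⟩)
        · exact Or.inl (Or.inl hy)
        · exact Or.inl (Or.inr hy)
        · exact Or.inr ⟨x', hx', hy⟩

-- a filtered map is a flatMap that yields a singleton or nothing
theorem map_filter_eq_flatMap {ι α : Type} (xs : List ι) (p : ι → Bool) (f : ι → α) :
    ((xs.filter p).map f) = xs.flatMap (fun x => if p x then [f x] else []) := by
  induction xs with
  | nil => simp
  | cons x xs ih =>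
      by_cases h : p x <;> simp [h, ih]


-- the set of board cells adjacent to an occupied cell, as a proposition
def BannedP (board : List (List (Option Int))) (y : Int × Int) : Prop :=
  ∃ i ∈ List.range board.length, ∃ j ∈ List.range board.length,
    ((board.getD i []).getD j none).isSome = true ∧
    ∃ k ∈ ([-1, 0, 1] : List Int), ∃ l ∈ ([-1, 0, 1] : List Int),
      (k, l) ≠ ((0 : Int), (0 : Int)) ∧ y = ((i : Int) + k, (j : Int) + l)

theorem mem_bad (board : List (List (Option Int))) (y : Int × Int) :
    y ∈ (List.range board.length).foldl (fun bad i =>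
      (List.range board.length).foldl (fun bad j =>
        if ((board.getD i []).getD j none).isSome = true then
          ([-1, 0, 1] : List Int).foldl (fun bad k =>
            ([-1, 0, 1] : List Int).foldl (fun bad l =>
              if (k, l) ≠ ((0 : Int), (0 : Int)) then PySem.Set.add bad ((i : Int) + k, (j : Int) + l) else bad) bad) bad
        else bad) bad) (PySem.Set.empty : PySem.Set (Int × Int)) ↔ BannedP board y := by
  have hl : ∀ (i j : ℕ) (k : Int) (s : PySem.Set (Int × Int)) (y : Int × Int),
      y ∈ ([-1,0,1] : List Int).foldl (fun bad l => if (k, l) ≠ ((0:Int),(0:Int)) then PySem.Set.add bad ((i:Int)+k, (j:Int)+l) else bad) s ↔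
      y ∈ s ∨ ∃ l ∈ ([-1,0,1] : List Int), (k,l) ≠ ((0:Int),(0:Int)) ∧ y = ((i:Int)+k, (j:Int)+l) := by
    intro i j k s y
    refine mem_foldl_of_step _ _ (fun l y => (k,l) ≠ ((0:Int),(0:Int)) ∧ y = ((i:Int)+k,(j:Int)+l)) ?_ s y
    intro s l y
    split_ifs with h <;> simp [PySem.Set.mem_add, h]
  have hk : ∀ (i j : ℕ) (s : PySem.Set (Int × Int)) (y : Int × Int),
      y ∈ ([-1,0,1] : List Int).foldl (fun bad k => ([-1,0,1] : List Int).foldl (fun bad l => if (k, l) ≠ ((0:Int),(0:Int)) then PySem.Set.add bad ((i:Int)+k, (j:Int)+l) else bad) bad) s ↔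
      y ∈ s ∨ ∃ k ∈ ([-1,0,1] : List Int), ∃ l ∈ ([-1,0,1] : List Int), (k,l) ≠ ((0:Int),(0:Int)) ∧ y = ((i:Int)+k, (j:Int)+l) := by
    intro i j s y
    exact mem_foldl_of_step _ _ (fun k y => ∃ l ∈ ([-1,0,1] : List Int), (k,l) ≠ ((0:Int),(0:Int)) ∧ y = ((i:Int)+k,(j:Int)+l)) (fun s k y => hl i j k s y) s y
  have hj : ∀ (i : ℕ) (s : PySem.Set (Int × Int)) (y : Int × Int),
      y ∈ (List.range board.length).foldl (fun bad j => if ((board.getD i []).getD j none).isSome = true then ([-1,0,1] : List Int).foldl (fun bad k => ([-1,0,1] : List Int).foldl (fun bad l => if (k, l) ≠ ((0:Int),(0:Int)) then PySem.Set.add bad ((i:Int)+k, (j:Int)+l) else bad) bad) bad else bad) s ↔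
      y ∈ s ∨ ∃ j ∈ List.range board.length, ((board.getD i []).getD j none).isSome = true ∧ ∃ k ∈ ([-1,0,1] : List Int), ∃ l ∈ ([-1,0,1] : List Int), (k,l) ≠ ((0:Int),(0:Int)) ∧ y = ((i:Int)+k, (j:Int)+l) := by
    intro i s y
    refine mem_foldl_of_step _ _ (fun j y => ((board.getD i []).getD j none).isSome = true ∧ ∃ k ∈ ([-1,0,1] : List Int), ∃ l ∈ ([-1,0,1] : List Int), (k,l) ≠ ((0:Int),(0:Int)) ∧ y = ((i:Int)+k,(j:Int)+l)) ?_ s y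
    intro s j y
    split_ifs with h
    · rw [hk i j s y]; simp only [h, true_and]
    · simp only [h, Bool.false_eq_true, false_and, or_false]
  rw [mem_foldl_of_step _ _ (fun i y => ∃ j ∈ List.range board.length, ((board.getD i []).getD j none).isSome = true ∧ ∃ k ∈ ([-1,0,1] : List Int), ∃ l ∈ ([-1,0,1] : List Int), (k,l) ≠ ((0:Int),(0:Int)) ∧ y = ((i:Int)+k,(j:Int)+l)) (fun s i y => hj i s y) _ y]
  simp [BannedP, PySem.Set.empty]

theorem allP_iff (board : List (List (Option Int))) (a b : Int) (m : Int × Int) :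
    ((List.range board.length).all fun x =>
      (List.range board.length).all fun y =>
        !decide (((board.getD x []).getD y none).isSome = true) ||
          ([-1,0,1] : List Int).all fun k =>
            ([-1,0,1] : List Int).all fun l =>
              !decide ((k, l) ≠ ((0:Int), (0:Int))) || decide (m ≠ ((x:Int) + k - a, (y:Int) + l - b))) = true
    ↔ ¬ BannedP board (m.1 + a, m.2 + b) := by
  simp only [BannedP, List.all_eq_true, Bool.or_eq_true, Bool.not_eq_true',
    decide_eq_false_iff_not, decide_eq_true_eq, not_exists, not_and]
  constructor
  · intro h i hi j hj hocc k hk l hl hne heq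
    rcases h i hi j hj with hno | hall
    · exact hno hocc
    · rcases hall k hk l hl with h0 | hm
      · exact h0 hne
      · apply hm
        rw [Prod.ext_iff] at heq ⊢
        obtain ⟨h1, h2⟩ := heq
        exact ⟨by omega, by omega⟩
  · intro h i hi j hj
    by_cases hocc : ((board.getD i []).getD j none).isSome = true
    · right
      intro k hk l hl
      by_cases h0 : (k, l) = ((0:Int),(0:Int))
      · exact Or.inl fun hn => hn h0
      · right
        intro heq
        apply h i hi j hj hocc k hk l hl h0
        rw [Prod.ext_iff] at heq ⊢
        obtain ⟨h1, h2⟩ := heq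
        exact ⟨by omega, by omega⟩
    · exact Or.inl hocc

theorem void_spec : Claim_equal_void := by
  intro initpos board _hdom _hpre
  unfold Spec_void void void_alt
  simp only [PySem.List.foldl_append_singleton_eq_map, PySem.List.foldl_append_eq_flatMap,
    ite_filter_eq_filter, foldl_filter_eq_filter_all, List.nil_append]
  rw [List.filter_flatMap]
  simp only [List.filter_map, List.map_flatMap, map_filter_eq_flatMap]
  refine List.flatMap_congr ?_
  intro x hx
  refine List.flatMap_congr ?_
  intro y hy
  simp only [Function.comp_apply]
  have hiff := allP_iff board initpos.1 initpos.2 (x - initpos.1, y - initpos.2)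
  simp only [sub_add_cancel] at hiff
  by_cases hB : BannedP board (x, y)
  · rw [if_neg (fun h => (hiff.mp h) hB), if_pos ((mem_bad board (x, y)).mpr hB), List.map_nil]
  · rw [if_pos (hiff.mpr hB), if_neg (fun h => hB ((mem_bad board (x, y)).mp h)), List.map_cons, List.map_nil]
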